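-- pv_equiv track=rewrite | github.com/papanokechi/siarc-relay-bridge | sessions/2026-05-02/XI0-D3-DIRECT/xi0_d3_runner.py | newton_edge_vertices
-- ===== SOURCE A (Python) =====
-- def newton_edge_vertices(pts):
--     by_i: dict[int, list[int]] = {}
--     for (i, j), c in pts.items():
--         if c == 0:
--             continue
--         by_i.setdefault(i, []).append(j)
--     js_at_1 = max(by_i.get(1, [-1]))
--     return [(0, 0), (1, js_at_1)]
-- ===== SOURCE B (Python) =====
-- def newton_edge_vertices(pts):
--     # Sort all terms by j descending, then scan for the first term on row i == 1
--     # with a nonzero coefficient: its j is the maximum such j.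
--     for (i, j), c in sorted(pts.items(), key=lambda kv: kv[0][1], reverse=True):
--         if i == 1 and c != 0:
--             return [(0, 0), (1, j)]
--     return [(0, 0), (1, -1)]
-- ===== Notes on version B (the rewrite author's own statement) =====
-- stated objective: alternative
-- what changed: Replaces A's group-by-i dict + max over one bucket with a sort-then-early-return scan: sort the items by j descending and return the first term with i == 1 and nonzero coefficient (or -1 if none).
import Mathlib
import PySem

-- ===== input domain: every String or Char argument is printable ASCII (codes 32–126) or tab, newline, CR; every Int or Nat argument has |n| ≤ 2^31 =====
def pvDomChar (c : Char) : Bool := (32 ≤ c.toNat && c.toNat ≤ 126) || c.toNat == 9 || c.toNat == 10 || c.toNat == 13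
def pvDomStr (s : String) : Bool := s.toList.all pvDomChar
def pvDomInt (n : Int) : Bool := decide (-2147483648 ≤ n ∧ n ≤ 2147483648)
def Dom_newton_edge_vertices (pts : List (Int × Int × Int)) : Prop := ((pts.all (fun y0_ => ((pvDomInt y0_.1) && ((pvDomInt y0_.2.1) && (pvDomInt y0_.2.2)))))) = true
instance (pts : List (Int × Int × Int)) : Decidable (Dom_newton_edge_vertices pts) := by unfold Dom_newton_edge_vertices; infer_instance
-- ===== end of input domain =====

-- B replaces A's group-into-a-dict-of-lists-then-max with a different algorithm: sort the
-- terms by j descending, then early-return the first term with i == 1 and nonzero coefficient.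


-- ===== PORT A =====
-- for (i, j), c in pts.items(): if c == 0: continue; by_i.setdefault(i, []).append(j)
-- (setdefault-then-append is Dict.modify with default []); js_at_1 = max(by_i.get(1, [-1])).
-- The list handed to max is always nonempty, so max?'s .getD (-1) default is never used.
def newton_edge_vertices (pts : List (Int × Int × Int)) : List (Int × Int) :=
  let by_i : PySem.Dict Int (List Int) :=
    pts.foldl (fun d t => if t.2.2 = 0 then d else d.modify t.1 [] (· ++ [t.2.1]))
      PySem.Dict.empty
  let js_at_1 := (PySem.List.max? (by_i.getD 1 [-1]) (fun y => y)).getD (-1)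
  [(0, 0), (1, js_at_1)]

-- ===== PORT B =====
-- the for-loop with early return over the sorted items
def pvScan : List (Int × Int × Int) → List (Int × Int)
  | [] => [(0, 0), (1, -1)]
  | t :: rest => if t.1 = 1 ∧ t.2.2 ≠ 0 then [(0, 0), (1, t.2.1)] else pvScan rest

def newton_edge_vertices_alt (pts : List (Int × Int × Int)) : List (Int × Int) :=
  pvScan (PySem.List.sorted pts (fun t => t.2.1) true)

-- ===== PRECONDITION & SPEC =====
def Spec_newton_edge_vertices (pts : List (Int × Int × Int)) (out : List (Int × Int)) : Prop := out = newton_edge_vertices_alt pts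
instance (pts : List (Int × Int × Int)) (out : List (Int × Int)) : Decidable (Spec_newton_edge_vertices pts out) := by unfold Spec_newton_edge_vertices; infer_instance

-- ===== CLAIM =====
def Claim_equal_newton_edge_vertices : Prop := ∀ (pts : List (Int × Int × Int)), Dom_newton_edge_vertices pts → Spec_newton_edge_vertices pts (newton_edge_vertices pts)

-- ===== LEMMAS AND PROOFS =====

-- the j's of the entries A buckets under key 1 (c ≠ 0, i = 1), in order
def pvL (pts : List (Int × Int × Int)) : List Int :=
  (pts.filter (fun t => !decide (t.2.2 = 0) && (t.1 == 1))).map (fun t => t.2.1)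

-- A's fold: the bucket at key 1 accumulates exactly pvL
theorem pvA_getD (pts : List (Int × Int × Int)) (d : PySem.Dict Int (List Int)) :
    (pts.foldl (fun d t => if t.2.2 = 0 then d else d.modify t.1 [] (· ++ [t.2.1])) d).getD 1 []
      = d.getD 1 [] ++ pvL pts := by
  induction pts generalizing d with
  | nil => simp [pvL]
  | cons t rest ih =>
    simp only [List.foldl_cons, pvL, List.filter_cons]
    by_cases hc : t.2.2 = 0
    · simp [hc, ih, pvL]
    · by_cases hi : t.1 = 1
      · simp [hc, hi, ih, pvL, PySem.Dict.getD_modify_self]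
      · simp [hc, hi, ih, pvL, PySem.Dict.getD_modify_of_ne _ _ _ (Ne.symm hi)]

-- A's fold: key 1 is present iff pvL is nonempty (from an empty start)
theorem pvA_contains (pts : List (Int × Int × Int)) (d : PySem.Dict Int (List Int)) :
    (pts.foldl (fun d t => if t.2.2 = 0 then d else d.modify t.1 [] (· ++ [t.2.1])) d).contains 1
      = (d.contains 1 || !(pvL pts).isEmpty) := by
  induction pts generalizing d with
  | nil => simp [pvL]
  | cons t rest ih =>
    simp only [List.foldl_cons, pvL, List.filter_cons]
    by_cases hc : t.2.2 = 0
    · simp [hc, ih, pvL]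
    · by_cases hi : t.1 = 1
      · simp [hc, hi, ih, pvL, PySem.Dict.contains_modify]
      · have : ((1 : Int) == t.1) = false := by simp [Ne.symm hi]
        simp [hc, hi, ih, pvL, PySem.Dict.contains_modify, this]

-- B's scan returns the j of the first element passing the filter (or -1)
theorem pvScan_eq (l : List (Int × Int × Int)) :
    pvScan l = [(0, 0), (1, match l.filter (fun t => !decide (t.2.2 = 0) && (t.1 == 1)) with
                             | [] => -1
                             | t :: _ => t.2.1)] := by
  induction l with
  | nil => rfl
  | cons t rest ih =>
    simp only [pvScan, List.filter_cons]
    by_cases h1 : t.1 = 1 <;> by_cases h2 : t.2.2 ≠ 0 <;> simp [h1, h2, ih]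

theorem pv_foldl_max_mem (t : List Int) (x : Int) : t.foldl max x ∈ x :: t := by
  induction t generalizing x with
  | nil => simp
  | cons a t ih =>
    simp only [List.foldl_cons]
    rcases List.mem_cons.mp (ih (max x a)) with h | h
    · rw [h]; rcases max_choice x a with h' | h' <;> rw [h'] <;> simp
    · simp [h]

theorem pv_le_foldl_max' (t : List Int) (x : Int) : x ≤ t.foldl max x := by
  induction t generalizing x with
  | nil => simp
  | cons a t ih => exact le_trans (le_max_left x a) (ih (max x a))

theorem pv_le_foldl_max (t : List Int) (x : Int) : ∀ y ∈ x :: t, y ≤ t.foldl max x := by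
  induction t generalizing x with
  | nil => simp
  | cons a t ih =>
    intro y hy
    simp only [List.foldl_cons]
    rcases List.mem_cons.mp hy with rfl | hy'
    · exact le_trans (le_max_left y a) (pv_le_foldl_max' t (max y a))
    · rcases List.mem_cons.mp hy' with rfl | hy''
      · exact le_trans (le_max_right x y) (pv_le_foldl_max' t (max x y))
      · exact ih (max x a) y (List.mem_cons.mpr (Or.inr hy''))

theorem pv_foldl_max_eq (t : List Int) (x m : Int) (hmem : m ∈ x :: t)
    (hub : ∀ y ∈ x :: t, y ≤ m) : t.foldl max x = m :=
  le_antisymm (hub _ (pv_foldl_max_mem t x)) (pv_le_foldl_max t x m hmem)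

-- ===== VERDICT =====
theorem newton_edge_vertices_spec : Claim_equal_newton_edge_vertices := by
  intro pts _
  unfold Spec_newton_edge_vertices newton_edge_vertices newton_edge_vertices_alt
  rw [pvScan_eq]
  have hA := pvA_getD pts PySem.Dict.empty
  have hC := pvA_contains pts PySem.Dict.empty
  simp only [PySem.Dict.getD_empty, PySem.Dict.contains_empty, List.nil_append, Bool.false_or] at hA hC
  set s := PySem.List.sorted pts (fun t => t.2.1) true with hs
  have hperm : ((s.filter (fun t => !decide (t.2.2 = 0) && (t.1 == 1))).map (fun t => t.2.1)).Perm (pvL pts) := by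
    exact ((PySem.List.sorted_perm pts (fun t => t.2.1) true).filter _).map _
  cases hL : pvL pts with
  | nil =>
    rw [hL] at hA hC hperm
    have hFnil : s.filter (fun t => !decide (t.2.2 = 0) && (t.1 == 1)) = [] := by
      have := List.Perm.eq_nil hperm
      exact List.map_eq_nil_iff.mp this
    simp only [List.isEmpty_nil, Bool.not_true] at hC
    simp [hFnil, PySem.Dict.getD_of_not_contains _ _ hC, PySem.List.max?_id_cons]
  | cons x t =>
    rw [hL] at hA hC hperm
    simp only [List.isEmpty_cons, Bool.not_false] at hC
    have hget : (pts.foldl (fun d t => if t.2.2 = 0 then d else d.modify t.1 [] (· ++ [t.2.1]))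
        PySem.Dict.empty).getD 1 [-1] = x :: t := by
      rw [PySem.Dict.getD_eq_get?_getD]
      rcases h : (pts.foldl (fun d t => if t.2.2 = 0 then d else d.modify t.1 [] (· ++ [t.2.1]))
          PySem.Dict.empty).get? 1 with _ | v
      · rw [PySem.Dict.contains_eq_isSome_get?, h] at hC; simp at hC
      · rw [h]
        rw [PySem.Dict.getD_eq_get?_getD, h] at hA
        simpa using hA
    cases hF : s.filter (fun t => !decide (t.2.2 = 0) && (t.1 == 1)) with
    | nil =>
      rw [hF] at hperm
      exact absurd (List.Perm.eq_nil hperm.symm) (by simp)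
    | cons h f =>
      rw [hF] at hperm
      -- s is sorted descending in j, so is its filtered sublist, so h.2.1 bounds f
      have hpair : (h :: f).Pairwise (fun a b : Int × Int × Int => b.2.1 ≤ a.2.1) := by
        have := PySem.List.sorted_pairwise_rev pts (fun t => t.2.1)
        rw [← hs] at this
        exact hF ▸ this.filter _
      have hub : ∀ y ∈ x :: t, y ≤ h.2.1 := by
        intro y hy
        have hy' : y ∈ (h :: f).map (fun t => t.2.1) := hperm.mem_iff.mpr hy
        rcases List.mem_map.mp hy' with ⟨z, hz, rfl⟩
        rcases List.mem_cons.mp hz with rfl | hz'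
        · exact le_refl _
        · exact (List.pairwise_cons.mp hpair).1 z hz'
      have hmem : h.2.1 ∈ x :: t := by
        have : h.2.1 ∈ (h :: f).map (fun t => t.2.1) := by simp
        exact hperm.mem_iff.mp this
      simp [hget, PySem.List.max?_id_cons, pv_foldl_max_eq t x h.2.1 hmem hub]
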